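-- pv_equiv track=rewrite | github.com/VladimirZapryanov/SoftUni-Courses | Programming_Basics_with_Python/nested_loop_more_exercises/02._letters_combinations.py | letter_combinator
-- ===== SOURCE A (Python) =====
-- def letter_combinator(start_letter, end_letter, forbidden_letter):
--     start_number = ord(start_letter)
--     end_number = ord(end_letter)
--     forbidden_number = ord(forbidden_letter)
--     counter = 0
--     all_combinations = []
--
--     for n1 in range(start_number, end_number + 1):
--         for n2 in range(start_number, end_number + 1):
--             for n3 in range(start_number, end_number + 1):
--                 if not n1 == forbidden_number and not n2 == forbidden_number and not n3 == forbidden_number: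
--                     counter += 1
--                     all_combinations.append(f'{chr(n1)}{chr(n2)}{chr(n3)}')
--
--     return f"{' '.join(all_combinations)} {counter}"
-- ===== SOURCE B (Python) =====
-- def letter_combinator(start_letter, end_letter, forbidden_letter):
--     forbidden = ord(forbidden_letter)
--     allowed = [chr(n) for n in range(ord(start_letter), ord(end_letter) + 1)
--                if n != forbidden]
--     m = len(allowed)
--     parts = []
--     for i in range(m ** 3):
--         q, c = divmod(i, m)
--         a, b = divmod(q, m)
--         parts.append(allowed[a] + allowed[b] + allowed[c])
--     return f"{' '.join(parts)} {m ** 3}"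
-- ===== Notes on version B (the rewrite author's own statement) =====
-- stated objective: alternative
-- what changed: B replaces the three nested character loops by mixed-radix unranking: it pre-filters the allowed alphabet once, then a single flat loop over range(m**3) decodes each rank i into its three letter indices with divmod, and the count is the closed form m**3 instead of a counter.
import Mathlib
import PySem

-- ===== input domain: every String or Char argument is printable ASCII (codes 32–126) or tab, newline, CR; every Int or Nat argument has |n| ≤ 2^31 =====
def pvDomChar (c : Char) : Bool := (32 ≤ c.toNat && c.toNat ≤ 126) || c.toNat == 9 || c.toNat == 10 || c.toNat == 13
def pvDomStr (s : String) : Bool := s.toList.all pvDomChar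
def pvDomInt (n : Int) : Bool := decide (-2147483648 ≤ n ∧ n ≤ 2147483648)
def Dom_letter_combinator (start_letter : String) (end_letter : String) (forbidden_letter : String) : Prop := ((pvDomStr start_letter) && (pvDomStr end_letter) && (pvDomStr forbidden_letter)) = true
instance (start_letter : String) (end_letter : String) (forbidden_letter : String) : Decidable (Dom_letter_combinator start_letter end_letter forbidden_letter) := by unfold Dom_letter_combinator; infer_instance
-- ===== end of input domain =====

-- B replaces the three nested character loops by mixed-radix unranking: it pre-filters the
-- allowed alphabet once, then one flat loop over range(m**3) decodes each rank i into its
-- three digit indices with divmod; the count is the closed form m**3.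

-- ===== PORT A =====
-- ord(s) for a 1-char string s (Pre_ guarantees length 1; headD is irrelevant padding outside Pre_)
def pvOrd (s : String) : Int := (s.toList.headD ' ').toNat

def letter_combinator (start_letter : String) (end_letter : String) (forbidden_letter : String) : String :=
  let start_number := pvOrd start_letter
  let end_number := pvOrd end_letter
  let forbidden_number := pvOrd forbidden_letter
  let r := PySem.List.pyRange start_number (end_number + 1) 1
  let st :=
    r.foldl (fun a1 n1 =>
      r.foldl (fun a2 n2 =>
        r.foldl (fun a3 n3 =>
          if (n1 != forbidden_number) && (n2 != forbidden_number) && (n3 != forbidden_number) then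
            (a3.1 + 1, a3.2 ++ [String.ofList [Char.ofNat n1.toNat, Char.ofNat n2.toNat, Char.ofNat n3.toNat]])
          else a3) a2) a1) ((0 : Int), ([] : List String))
  PySem.Str.join " " st.2 ++ " " ++ PySem.Int.toStr st.1

-- ===== PORT B =====
-- divmod(i, m): PySem.Int.floordiv/mod are Python's floor-division pair; the loop body only
-- runs with 0 ≤ i < m**3 (hence m > 0), exactly where Python's divmod returns (i//m, i%m).
def letter_combinator_alt (start_letter : String) (end_letter : String) (forbidden_letter : String) : String :=
  let forbidden := pvOrd forbidden_letter
  let allowed : List String :=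
    ((PySem.List.pyRange (pvOrd start_letter) (pvOrd end_letter + 1) 1).filter
      (fun n => n != forbidden)).map (fun n => String.ofList [Char.ofNat n.toNat])
  let m : Int := (allowed.length : Int)
  let parts : List String :=
    (PySem.List.pyRange 0 (m ^ 3) 1).foldl (fun acc i =>
      let q := PySem.Int.floordiv i m
      let c := PySem.Int.mod i m
      let a := PySem.Int.floordiv q m
      let b := PySem.Int.mod q m
      acc ++ [PySem.List.pyGetD allowed a "" ++ PySem.List.pyGetD allowed b "" ++ PySem.List.pyGetD allowed c ""]) []
  PySem.Str.join " " parts ++ " " ++ PySem.Int.toStr (m ^ 3)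

-- ===== PRECONDITION & SPEC =====
-- Pre_: ord() raises TypeError unless each argument is a single character; excluded inputs are exactly those crashes.
def Pre_letter_combinator (start_letter : String) (end_letter : String) (forbidden_letter : String) : Prop :=
  start_letter.toList.length = 1 ∧ end_letter.toList.length = 1 ∧ forbidden_letter.toList.length = 1
instance (start_letter : String) (end_letter : String) (forbidden_letter : String) : Decidable (Pre_letter_combinator start_letter end_letter forbidden_letter) := by unfold Pre_letter_combinator; infer_instance
def pvWitness_letter_combinator : String × String × String := ("a", "d", "b")
def Spec_letter_combinator (start_letter : String) (end_letter : String) (forbidden_letter : String) (out : String) : Prop := out = letter_combinator_alt start_letter end_letter forbidden_letter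
instance (start_letter : String) (end_letter : String) (forbidden_letter : String) (out : String) : Decidable (Spec_letter_combinator start_letter end_letter forbidden_letter out) := by unfold Spec_letter_combinator; infer_instance

-- ===== CLAIM (what is proved, stated in full; the proofs are below) =====
def Claim_equal_letter_combinator : Prop := ∀ (start_letter : String) (end_letter : String) (forbidden_letter : String), Dom_letter_combinator start_letter end_letter forbidden_letter → Pre_letter_combinator start_letter end_letter forbidden_letter → Spec_letter_combinator start_letter end_letter forbidden_letter (letter_combinator start_letter end_letter forbidden_letter)

-- ===== LEMMAS AND PROOFS =====

-- a fold that adds a block's length and appends the block is a flatMap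
lemma foldl_len_app {α : Type} (l : List α) (X : α → List String) (acc : Int × List String) :
    l.foldl (fun a n => (a.1 + ((X n).length : Int), a.2 ++ X n)) acc
      = (acc.1 + ((l.flatMap X).length : Int), acc.2 ++ l.flatMap X) := by
  induction l generalizing acc with
  | nil => simp
  | cons x xs ih =>
    simp [List.foldl_cons, ih]
    ring

-- guarded singleton flatMap is filter-then-map
lemma flatMap_if_singleton {β : Type} (l : List Int) (p : Int → Bool) (F : Int → List β) :
    l.flatMap (fun x => if p x then F x else []) = (l.filter p).flatMap F := by
  induction l with
  | nil => simp
  | cons x xs ih =>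
    by_cases h : p x <;> simp [h, ih]

lemma flatMap_guard {β : Type} (l : List Int) (b : Bool) (p : Int → Bool) (F : Int → List β) :
    l.flatMap (fun x => if b && p x then F x else []) = if b then (l.filter p).flatMap F else [] := by
  cases b
  · simp
  · simp [flatMap_if_singleton]

lemma flatMap_one {α β : Type} (l : List α) (f : α → β) :
    l.flatMap (fun x => [f x]) = l.map f := by
  induction l <;> simp_all

-- A's triple nested fold computes (length, list) of the filtered triple flatMap
lemma A_loop (r : List Int) (p : Int → Bool) (g : Int → Int → Int → String) :
    r.foldl (fun a1 n1 =>
      r.foldl (fun a2 n2 =>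
        r.foldl (fun a3 n3 =>
          if p n1 && p n2 && p n3 then (a3.1 + 1, a3.2 ++ [g n1 n2 n3]) else a3) a2) a1)
      ((0 : Int), ([] : List String))
    = ((((r.filter p).flatMap (fun n1 => (r.filter p).flatMap (fun n2 => (r.filter p).map (g n1 n2)))).length : Int),
       (r.filter p).flatMap (fun n1 => (r.filter p).flatMap (fun n2 => (r.filter p).map (g n1 n2)))) := by
  have h3 : ∀ (n1 n2 : Int) (a : Int × List String),
      r.foldl (fun a3 n3 =>
        if p n1 && p n2 && p n3 then (a3.1 + 1, a3.2 ++ [g n1 n2 n3]) else a3) a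
      = (a.1 + (((r.flatMap (fun n3 => if p n1 && p n2 && p n3 then [g n1 n2 n3] else [])).length : Int)),
         a.2 ++ r.flatMap (fun n3 => if p n1 && p n2 && p n3 then [g n1 n2 n3] else [])) := by
    intro n1 n2 a
    have := foldl_len_app r (fun n3 => if p n1 && p n2 && p n3 then [g n1 n2 n3] else []) a
    rw [← this]
    apply PySem.List.foldl_congr_mem
    intro b x _
    by_cases h : p n1 && p n2 && p x <;> simp [h]
  have h2 : ∀ (n1 : Int) (a : Int × List String),
      r.foldl (fun a2 n2 =>
        r.foldl (fun a3 n3 =>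
          if p n1 && p n2 && p n3 then (a3.1 + 1, a3.2 ++ [g n1 n2 n3]) else a3) a2) a
      = (a.1 + (((r.flatMap (fun n2 => r.flatMap (fun n3 => if p n1 && p n2 && p n3 then [g n1 n2 n3] else []) )).length : Int)),
         a.2 ++ r.flatMap (fun n2 => r.flatMap (fun n3 => if p n1 && p n2 && p n3 then [g n1 n2 n3] else []))) := by
    intro n1 a
    have := foldl_len_app r (fun n2 => r.flatMap (fun n3 => if p n1 && p n2 && p n3 then [g n1 n2 n3] else [])) a
    rw [← this]
    apply PySem.List.foldl_congr_mem
    intro b x _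
    exact h3 n1 x b
  have h1 : r.foldl (fun a1 n1 =>
      r.foldl (fun a2 n2 =>
        r.foldl (fun a3 n3 =>
          if p n1 && p n2 && p n3 then (a3.1 + 1, a3.2 ++ [g n1 n2 n3]) else a3) a2) a1)
      ((0 : Int), ([] : List String))
      = ((0 : Int) + (((r.flatMap (fun n1 => r.flatMap (fun n2 => r.flatMap (fun n3 => if p n1 && p n2 && p n3 then [g n1 n2 n3] else [])))).length : Int)),
         ([] : List String) ++ r.flatMap (fun n1 => r.flatMap (fun n2 => r.flatMap (fun n3 => if p n1 && p n2 && p n3 then [g n1 n2 n3] else [])))) := by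
    have := foldl_len_app r (fun n1 => r.flatMap (fun n2 => r.flatMap (fun n3 => if p n1 && p n2 && p n3 then [g n1 n2 n3] else []))) ((0 : Int), ([] : List String))
    rw [← this]
    apply PySem.List.foldl_congr_mem
    intro b x _
    exact h2 x b
  rw [h1]
  simp only [flatMap_guard, flatMap_if_singleton]
  simp [flatMap_one]

-- pointwise congruence for flatMap
lemma flatMap_congr_mem {α β : Type} {l : List α} {f g : α → List β}
    (h : ∀ a ∈ l, f a = g a) : l.flatMap f = l.flatMap g := by
  induction l with
  | nil => rfl
  | cons x xs ih =>
    simp only [List.flatMap_cons, h x (by simp)]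
    rw [ih (fun a ha => h a (by simp [ha]))]

-- unranking a product: a range of m*n ranks, decoded by divmod, is the nested enumeration
lemma range_mul_flatMap {α : Type} (m n : Nat) (F : Nat → Nat → List α) :
    (List.range (m * n)).flatMap (fun i => F (i / n) (i % n))
      = (List.range m).flatMap (fun a => (List.range n).flatMap (F a)) := by
  rcases Nat.eq_zero_or_pos n with h | h
  · subst h; simp
  · induction m with
    | zero => simp
    | succ m ih =>
      have hm : (m + 1) * n = m * n + n := by ring
      rw [hm, List.range_add, List.flatMap_append, ih, List.range_succ, List.flatMap_append,
        List.flatMap_map]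
      congr 1
      simp only [List.flatMap_cons, List.flatMap_nil, List.append_nil]
      apply flatMap_congr_mem
      intro b hb
      have hb' : b < n := List.mem_range.mp hb
      have hd : (m * n + b) / n = m := by
        rw [Nat.mul_comm m n, Nat.mul_add_div h, Nat.div_eq_of_lt hb']
        omega
      have hm' : (m * n + b) % n = b := by
        rw [Nat.mul_comm m n, Nat.mul_add_mod, Nat.mod_eq_of_lt hb']
      simp [hd, hm']

-- replacing indices into l by the elements of l, flatMap form
lemma flatMap_getD_range {α : Type} (l : List String) (d : String) (K : String → List α) :
    (List.range l.length).flatMap (fun a => K (l.getD a d)) = l.flatMap K := by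
  induction l with
  | nil => simp
  | cons x xs ih =>
    rw [List.length_cons, List.range_succ_eq_map, List.flatMap_cons, List.flatMap_map]
    simp only [List.getD_cons_zero, List.getD_cons_succ, List.flatMap_cons]
    rw [ih]

-- replacing indices into l by the elements of l, map form
lemma map_getD_range {β : Type} (l : List String) (d : String) (f : String → β) :
    (List.range l.length).map (fun a => f (l.getD a d)) = l.map f := by
  induction l with
  | nil => simp
  | cons x xs ih =>
    rw [List.length_cons, List.range_succ_eq_map, List.map_cons, List.map_map]
    simp only [List.getD_cons_zero, List.getD_cons_succ, Function.comp_def]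
    rw [ih]
    rfl

-- B's flat unranking loop builds exactly the nested triple enumeration of l
lemma B_loop (l : List String) :
    (PySem.List.pyRange 0 ((l.length : Int) ^ 3) 1).foldl (fun acc i =>
      acc ++ [PySem.List.pyGetD l (PySem.Int.floordiv (PySem.Int.floordiv i (l.length : Int)) (l.length : Int)) "" ++
              PySem.List.pyGetD l (PySem.Int.mod (PySem.Int.floordiv i (l.length : Int)) (l.length : Int)) "" ++
              PySem.List.pyGetD l (PySem.Int.mod i (l.length : Int)) ""]) []
    = l.flatMap (fun a => l.flatMap (fun b => l.map (fun c => a ++ b ++ c))) := by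
  rw [PySem.List.foldl_append_singleton_eq_map]
  have h3 : ((l.length : Int) ^ 3) = ((l.length ^ 3 : Nat) : Int) := by push_cast; ring
  rw [h3, PySem.List.pyRange_zero_natCast, List.map_map, List.nil_append]
  have hb : (List.range (l.length ^ 3)).map
      ((fun i => PySem.List.pyGetD l (PySem.Int.floordiv (PySem.Int.floordiv i (l.length : Int)) (l.length : Int)) "" ++
              PySem.List.pyGetD l (PySem.Int.mod (PySem.Int.floordiv i (l.length : Int)) (l.length : Int)) "" ++
              PySem.List.pyGetD l (PySem.Int.mod i (l.length : Int)) "") ∘ (fun k : Nat => (k : Int)))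
      = (List.range (l.length ^ 3)).map
      (fun k => l.getD (k / l.length / l.length) "" ++ l.getD (k / l.length % l.length) "" ++ l.getD (k % l.length) "") := by
    apply List.map_congr_left
    intro k _
    simp only [Function.comp_apply]
    rw [PySem.Int.floordiv_natCast, PySem.Int.floordiv_natCast, PySem.Int.mod_natCast,
      PySem.Int.mod_natCast]
    simp only [PySem.List.pyGetD_natCast]
  rw [hb]
  have hpow : l.length ^ 3 = l.length * l.length * l.length := by ring
  rw [hpow, ← flatMap_one]
  calc (List.range (l.length * l.length * l.length)).flatMap
        (fun k => [l.getD (k / l.length / l.length) "" ++ l.getD (k / l.length % l.length) "" ++ l.getD (k % l.length) ""])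
      = (List.range (l.length * l.length)).flatMap (fun q => (List.range l.length).flatMap
          (fun c => [l.getD (q / l.length) "" ++ l.getD (q % l.length) "" ++ l.getD c ""])) :=
        range_mul_flatMap (l.length * l.length) l.length
          (fun q c => [l.getD (q / l.length) "" ++ l.getD (q % l.length) "" ++ l.getD c ""])
    _ = (List.range l.length).flatMap (fun a => (List.range l.length).flatMap (fun b =>
          (List.range l.length).flatMap
          (fun c => [l.getD a "" ++ l.getD b "" ++ l.getD c ""]))) :=
        range_mul_flatMap l.length l.length
          (fun a b => (List.range l.length).flatMap (fun c => [l.getD a "" ++ l.getD b "" ++ l.getD c ""]))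
    _ = l.flatMap (fun a => l.flatMap (fun b => l.map (fun c => a ++ b ++ c))) := by
        rw [← flatMap_getD_range l "" (fun a => l.flatMap (fun b => l.map (fun c => a ++ b ++ c)))]
        apply flatMap_congr_mem
        intro a _
        rw [← flatMap_getD_range l "" (fun b => l.map (fun c => l.getD a "" ++ b ++ c))]
        apply flatMap_congr_mem
        intro b _
        rw [← map_getD_range l "" (fun c => l.getD a "" ++ l.getD b "" ++ c), flatMap_one]

-- length of the nested triple enumeration
lemma len_triple {α β : Type} (l : List α) (g : α → α → α → β) :
    (l.flatMap (fun a => l.flatMap (fun b => l.map (g a b)))).length = l.length ^ 3 := by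
  simp [List.length_flatMap]
  induction l with
  | nil => simp
  | cons x xs ih => simp_all; ring

-- ===== VERDICT (by name: the statement is the Claim_ definition above) =====
theorem letter_combinator_spec : Claim_equal_letter_combinator := by
  intro s e f _ _
  unfold Spec_letter_combinator letter_combinator letter_combinator_alt
  simp only []
  rw [A_loop (PySem.List.pyRange (pvOrd s) (pvOrd e + 1) 1) (fun n => n != pvOrd f)
      (fun n1 n2 n3 => String.ofList [Char.ofNat n1.toNat, Char.ofNat n2.toNat, Char.ofNat n3.toNat]),
    B_loop]
  set Lp := (PySem.List.pyRange (pvOrd s) (pvOrd e + 1) 1).filter (fun n => n != pvOrd f) with hLp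
  have hT : (Lp.map (fun n => String.ofList [Char.ofNat n.toNat])).flatMap (fun a =>
        (Lp.map (fun n => String.ofList [Char.ofNat n.toNat])).flatMap (fun b =>
          (Lp.map (fun n => String.ofList [Char.ofNat n.toNat])).map (fun c => a ++ b ++ c)))
      = Lp.flatMap (fun n1 => Lp.flatMap (fun n2 => Lp.map
          (fun n3 => String.ofList [Char.ofNat n1.toNat, Char.ofNat n2.toNat, Char.ofNat n3.toNat]))) := by
    simp [List.flatMap_map, List.map_map, Function.comp_def]
    simp [← String.ofList_append]
  have hlen : ((Lp.flatMap (fun n1 => Lp.flatMap (fun n2 => Lp.map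
        (fun n3 => String.ofList [Char.ofNat n1.toNat, Char.ofNat n2.toNat, Char.ofNat n3.toNat])))).length : Int)
      = ((Lp.map (fun n => String.ofList [Char.ofNat n.toNat])).length : Int) ^ 3 := by
    rw [len_triple]
    push_cast [List.length_map]
    ring
  rw [hT, hlen]
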